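-- pv_equiv track=rewrite | github.com/ByThePowerOfScience/DivineJourney2Addons | python/GetCoreMods.py | convertDepsToFolderPaths
-- ===== SOURCE A (Python) =====
-- def convertDepsToFolderPaths(deps):
-- 	out = []
-- 	for d in deps:
-- 		d1 = d.split(":")
-- 		path = ""
-- 		for s in d1:
-- 			path += "/" + s.replace(".", "/")
-- 		out.append(path)
-- 	return out
-- ===== SOURCE B (Python) =====
-- def convertDepsToFolderPaths(deps):
-- 	return ["/" + d.replace(":", "/").replace(".", "/") for d in deps]
-- ===== Notes on version B (the rewrite author's own statement) =====
-- stated objective: simpler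
-- what changed: Replaces the nested split-on-':'-then-concatenate-per-segment loop with a single expression per dependency: prefix '/' and substitute every ':' and '.' by '/' via two chained replace calls, with no tokenization or accumulator.
import Mathlib
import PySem

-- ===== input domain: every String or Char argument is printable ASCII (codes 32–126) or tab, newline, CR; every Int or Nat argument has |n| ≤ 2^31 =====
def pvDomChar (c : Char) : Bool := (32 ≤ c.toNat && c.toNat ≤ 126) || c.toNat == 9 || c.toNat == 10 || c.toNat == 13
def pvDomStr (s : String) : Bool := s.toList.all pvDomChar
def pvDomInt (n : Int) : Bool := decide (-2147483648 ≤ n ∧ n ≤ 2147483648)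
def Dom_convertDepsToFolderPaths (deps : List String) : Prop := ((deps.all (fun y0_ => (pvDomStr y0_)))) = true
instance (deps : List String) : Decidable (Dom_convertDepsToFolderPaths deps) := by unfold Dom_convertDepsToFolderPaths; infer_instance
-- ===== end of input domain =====

-- B builds each path as '/' plus d with every ':' and '.' replaced by '/', instead of A's
-- split-on-':' with a per-segment concatenation loop (objective: simpler; same return value).

-- ===== PORT A =====
def convertDepsToFolderPaths (deps : List String) : List String :=
  deps.foldl (fun out d =>
    -- d.split(":") — sep is the nonempty literal ":", so Str.split? is always `some` (Python never raises here)
    let d1 := (PySem.Str.split? d ":").getD []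
    let path := d1.foldl (fun path s => path ++ ("/" ++ PySem.Str.replace s "." "/")) ""
    out ++ [path]) []

-- ===== PORT B =====
def convertDepsToFolderPaths_alt (deps : List String) : List String :=
  deps.map (fun d => "/" ++ PySem.Str.replace (PySem.Str.replace d ":" "/") "." "/")

-- ===== PRECONDITION & SPEC =====
def Spec_convertDepsToFolderPaths (deps : List String) (out : List String) : Prop := out = convertDepsToFolderPaths_alt deps
instance (deps : List String) (out : List String) : Decidable (Spec_convertDepsToFolderPaths deps out) := by unfold Spec_convertDepsToFolderPaths; infer_instance

-- ===== CLAIM (what is proved, stated in full; the proofs are below) =====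
def Claim_equal_convertDepsToFolderPaths : Prop := ∀ (deps : List String), Dom_convertDepsToFolderPaths deps → Spec_convertDepsToFolderPaths deps (convertDepsToFolderPaths deps)

-- ===== LEMMAS AND PROOFS =====

-- character substitution for a single-character replace
def pvSub (o n c : Char) : Char := if c = o then n else c

-- '.' → '/' on a character (A's per-segment replace; also B's second replace)
def pvF : Char → Char := pvSub '.' '/'
-- both ':' and '.' → '/' (the composite substitution B performs)
def pvG (c : Char) : Char := if c = ':' then '/' else pvF c

theorem pv_replace_go_step (o n : Char) (fuel : Nat) (c : Char) (t acc : List Char) :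
    PySem.Chars.replace.go [o] [n] (fuel+1) (c::t) acc
      = if c = o then PySem.Chars.replace.go [o] [n] fuel t (n :: acc)
        else PySem.Chars.replace.go [o] [n] fuel t (c :: acc) := by
  rw [PySem.Chars.replace.go]
  by_cases hc : c = o
  · simp [hc, List.isPrefixOf]
  · simp only [List.isPrefixOf, hc]
    rw [if_neg (by simp; exact fun h => absurd h.symm hc)]
    simp

theorem pv_replace_go_nil (o n : Char) (fuel : Nat) (acc : List Char) :
    PySem.Chars.replace.go [o] [n] fuel [] acc = acc.reverse := by
  cases fuel <;> (rw [PySem.Chars.replace.go]; simp)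

theorem pv_replace_go (o n : Char) :
    ∀ (l : List Char) (fuel : Nat) (acc : List Char), l.length ≤ fuel →
      PySem.Chars.replace.go [o] [n] fuel l acc = acc.reverse ++ l.map (pvSub o n) := by
  intro l
  induction l with
  | nil => intro fuel acc _; rw [pv_replace_go_nil]; simp
  | cons c t ih =>
    intro fuel acc h
    cases fuel with
    | zero => simp at h
    | succ fuel =>
      rw [pv_replace_go_step]
      have ht : t.length ≤ fuel := by simpa using h
      by_cases hc : c = o
      · rw [if_pos hc, ih _ _ ht]; simp [pvSub, hc]
      · rw [if_neg hc, ih _ _ ht]; simp [pvSub, hc]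

theorem pv_replace_single (o n : Char) (cs : List Char) :
    PySem.Chars.replace cs [o] [n] = cs.map (pvSub o n) := by
  rw [PySem.Chars.replace, if_neg (by simp)]
  simpa using pv_replace_go o n cs cs.length [] le_rfl

-- fuel-free mirror of PySem.Chars.splitOn.go for a single-character separator
def pvSgo (o : Char) : List Char → List Char → List (List Char) → List (List Char)
  | [], cur, acc => (cur.reverse :: acc).reverse
  | c :: t, cur, acc => if c = o then pvSgo o t [] (cur.reverse :: acc) else pvSgo o t (c :: cur) acc

theorem pv_split_go_step (o : Char) (fuel : Nat) (c : Char) (t cur : List Char) (acc : List (List Char)) :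
    PySem.Chars.splitOn.go [o] (fuel+1) (c::t) cur acc
      = if c = o then PySem.Chars.splitOn.go [o] fuel t [] (cur.reverse :: acc)
        else PySem.Chars.splitOn.go [o] fuel t (c :: cur) acc := by
  rw [PySem.Chars.splitOn.go]
  by_cases hc : c = o
  · simp [hc, List.isPrefixOf]
  · simp only [List.isPrefixOf, hc]
    rw [if_neg (by simp; exact fun h => absurd h.symm hc)]
    simp

theorem pv_split_go_nil (o : Char) (fuel : Nat) (cur : List Char) (acc : List (List Char)) (h : 0 < fuel) :
    PySem.Chars.splitOn.go [o] fuel [] cur acc = (cur.reverse :: acc).reverse := by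
  cases fuel with
  | zero => omega
  | succ fuel => rw [PySem.Chars.splitOn.go]; simp

theorem pv_split_go (o : Char) :
    ∀ (l : List Char) (fuel : Nat) (cur : List Char) (acc : List (List Char)), l.length < fuel →
      PySem.Chars.splitOn.go [o] fuel l cur acc = pvSgo o l cur acc := by
  intro l
  induction l with
  | nil => intro fuel cur acc h; rw [pv_split_go_nil o fuel cur acc (by omega)]; rfl
  | cons c t ih =>
    intro fuel cur acc h
    cases fuel with
    | zero => omega
    | succ fuel =>
      rw [pv_split_go_step]
      have ht : t.length < fuel := by simpa using h
      by_cases hc : c = o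
      · rw [if_pos hc, ih _ _ _ ht, pvSgo, if_pos hc]
      · rw [if_neg hc, ih _ _ _ ht, pvSgo, if_neg hc]

theorem pv_splitOn_eq_sgo (o : Char) (cs : List Char) :
    PySem.Chars.splitOn cs [o] = pvSgo o cs [] [] := by
  rw [PySem.Chars.splitOn]
  exact pv_split_go o cs (cs.length + 1) [] [] (Nat.lt_succ_self _)

theorem pv_sgo_flatten :
    ∀ (cs cur : List Char) (acc : List (List Char)),
      ((pvSgo ':' cs cur acc).map (fun s => '/' :: s.map pvF)).flatten
        = ((acc.reverse).map (fun s => '/' :: s.map pvF)).flatten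
            ++ '/' :: (cur.reverse.map pvF ++ cs.map pvG) := by
  intro cs
  induction cs with
  | nil => intro cur acc; simp [pvSgo]
  | cons c t ih =>
    intro cur acc
    by_cases hc : c = ':'
    · rw [pvSgo, if_pos hc, ih]
      simp [hc, pvG]
    · rw [pvSgo, if_neg hc, ih]
      simp [pvG, hc]

theorem pv_inner_chars (cs : List Char) :
    ((PySem.Chars.splitOn cs [':']).map (fun s => '/' :: s.map pvF)).flatten
      = '/' :: cs.map pvG := by
  rw [pv_splitOn_eq_sgo]
  simpa using pv_sgo_flatten cs [] []

-- the String-level A inner foldl, pushed to character lists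
theorem pv_foldl_str (h : String → String) :
    ∀ (l : List String) (init : String),
      (l.foldl (fun p s => p ++ h s) init).toList
        = init.toList ++ (l.map (fun s => (h s).toList)).flatten := by
  intro l
  induction l with
  | nil => intro init; simp
  | cons s t ih => intro init; rw [List.foldl_cons, ih]; simp

theorem pv_elem (d : String) :
    ((PySem.Str.split? d ":").getD []).foldl
        (fun path s => path ++ ("/" ++ PySem.Str.replace s "." "/")) ""
      = "/" ++ PySem.Str.replace (PySem.Str.replace d ":" "/") "." "/" := by
  apply String.toList_inj.mp
  rw [pv_foldl_str]
  have hsplit : PySem.Str.split? d ":" = some ((PySem.Chars.splitOn d.toList [':']).map String.ofList) := by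
    rw [PySem.Str.split?, PySem.Chars.split?]
    simp
  rw [hsplit]
  simp only [Option.getD_some, List.map_map]
  have hmap : ∀ s : List Char,
      (("/" ++ PySem.Str.replace (String.ofList s) "." "/").toList) = '/' :: s.map pvF := by
    intro s
    rw [String.toList_append, PySem.Str.toList_replace]
    have : (String.ofList s).toList = s := by simp
    rw [this]
    have h1 : ("." : String).toList = ['.'] := by decide
    have h2 : ("/" : String).toList = ['/'] := by decide
    rw [h1, h2, pv_replace_single]
    rfl
  have : ((PySem.Chars.splitOn d.toList [':']).map fun s =>
        (("/" ++ PySem.Str.replace (String.ofList s) "." "/").toList))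
      = (PySem.Chars.splitOn d.toList [':']).map (fun s => '/' :: s.map pvF) := by
    exact List.map_congr_left (fun s _ => hmap s)
  rw [Function.comp_def, this, pv_inner_chars]
  rw [String.toList_append, PySem.Str.toList_replace, PySem.Str.toList_replace]
  have h1 : (":" : String).toList = [':'] := by decide
  have h2 : ("/" : String).toList = ['/'] := by decide
  have h3 : ("." : String).toList = ['.'] := by decide
  rw [h1, h2, h3, pv_replace_single, pv_replace_single, List.map_map]
  have : (pvSub '.' '/' ∘ pvSub ':' '/') = pvG := by
    funext c
    by_cases hc : c = ':' <;> simp [pvSub, pvF, pvG, hc]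
  simp [this]

theorem pv_outer (f : String → String) :
    ∀ (l : List String) (init : List String),
      l.foldl (fun out d => out ++ [f d]) init = init ++ l.map f := by
  intro l
  induction l with
  | nil => intro init; simp
  | cons d t ih => intro init; rw [List.foldl_cons, ih]; simp

-- ===== VERDICT (by name: the statement is the Claim_ definition above) =====
theorem convertDepsToFolderPaths_spec : Claim_equal_convertDepsToFolderPaths := by
  intro deps _
  unfold Spec_convertDepsToFolderPaths convertDepsToFolderPaths convertDepsToFolderPaths_alt
  simp only []
  rw [pv_outer (fun d => ((PySem.Str.split? d ":").getD []).foldl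
        (fun path s => path ++ ("/" ++ PySem.Str.replace s "." "/")) "") deps []]
  simp only [List.nil_append]
  exact List.map_congr_left (fun d _ => pv_elem d)
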